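-- pv_equiv track=rewrite | github.com/Peazfull/the-forge | services/carousel/doss/doss_slide_service.py | _tokenize_highlights
-- ===== SOURCE A (Python) =====
-- def _tokenize_highlights(text: str) -> list[tuple[str, bool]]:
--     tokens: list[tuple[str, bool]] = []
--     if not text:
--         return tokens
--     parts = text.split("**")
--     for idx, part in enumerate(parts):
--         if not part:
--             continue
--         is_highlight = (idx % 2 == 1)
--         words = part.split()
--         for w in words:
--             tokens.append((w, is_highlight))
--     return tokens
-- ===== SOURCE B (Python) =====
-- def _tokenize_highlights(text: str) -> list[tuple[str, bool]]:
--     # single left-to-right character scan: no intermediate part/word lists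
--     tokens: list[tuple[str, bool]] = []
--     buf: list[str] = []
--     highlight = False
--     i = 0
--     n = len(text)
--     while i < n:
--         ch = text[i]
--         if ch == "*" and i + 1 < n and text[i + 1] == "*":
--             if buf:
--                 tokens.append(("".join(buf), highlight))
--             buf = []
--             highlight = not highlight
--             i += 2
--         elif ch.isspace():
--             if buf:
--                 tokens.append(("".join(buf), highlight))
--             buf = []
--             i += 1
--         else:
--             buf.append(ch)
--             i += 1
--     if buf:
--         tokens.append(("".join(buf), highlight))
--     return tokens
-- ===== Notes on version B (the rewrite author's own statement) =====
-- stated objective: alternative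
-- what changed: Replaces split('**') followed by per-part whitespace split() with a single character-by-character scanner that keeps a word buffer and toggles a highlight flag when it consumes '**'.
import Mathlib
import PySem

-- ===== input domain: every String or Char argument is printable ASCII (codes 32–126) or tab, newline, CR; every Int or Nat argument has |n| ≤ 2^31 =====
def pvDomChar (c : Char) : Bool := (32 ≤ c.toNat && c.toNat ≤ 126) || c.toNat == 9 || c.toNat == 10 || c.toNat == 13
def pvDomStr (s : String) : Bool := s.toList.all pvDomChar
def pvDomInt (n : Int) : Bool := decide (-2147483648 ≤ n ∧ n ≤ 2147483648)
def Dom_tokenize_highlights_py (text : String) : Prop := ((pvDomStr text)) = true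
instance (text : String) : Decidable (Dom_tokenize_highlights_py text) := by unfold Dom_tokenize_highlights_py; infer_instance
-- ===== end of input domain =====

-- B replaces split("**") + per-part split() by a single character scanner with a word buffer
-- and a highlight flag (alternative decomposition, same O(n) cost).


-- ===== PORT A =====
-- literal port of A: split on "**", enumerate the parts, whitespace-split each part,
-- flag = (part index odd); string work is done on List Char via PySem.Chars (exact)
def tokenize_highlights_py (text : String) : List (String × Bool) :=
  if text = "" then []
  else
    let parts : List (List Char) := PySem.Chars.splitOn text.toList ['*', '*']
    (PySem.List.enumerate parts).foldl
      (fun toks ip =>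
        if ip.2.isEmpty then toks
        else
          toks ++ (PySem.Chars.split₀ ip.2).map
            (fun w => (String.ofList w, decide (PySem.Int.mod ip.1 2 = 1))))
      []

-- ===== PORT B =====
-- scanner: buf is the current word, hl the highlight flag; "**" flushes and toggles,
-- whitespace flushes, any other char (a lone '*' included) extends buf
def scanTok : List Char → List Char → Bool → List (String × Bool)
  | [], buf, hl => if buf.isEmpty then [] else [(String.ofList buf, hl)]
  | '*' :: '*' :: rest, buf, hl =>
      (if buf.isEmpty then [] else [(String.ofList buf, hl)]) ++ scanTok rest [] (!hl)
  | c :: rest, buf, hl =>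
      if PySem.Chars.isspace c then
        (if buf.isEmpty then [] else [(String.ofList buf, hl)]) ++ scanTok rest [] hl
      else scanTok rest (buf ++ [c]) hl

def tokenize_highlights_py_alt (text : String) : List (String × Bool) :=
  scanTok text.toList [] false

-- ===== PRECONDITION & SPEC =====
def Spec_tokenize_highlights_py (text : String) (out : List (String × Bool)) : Prop := out = tokenize_highlights_py_alt text
instance (text : String) (out : List (String × Bool)) : Decidable (Spec_tokenize_highlights_py text out) := by unfold Spec_tokenize_highlights_py; infer_instance

-- ===== CLAIM (what is proved, stated in full; the proofs are below) =====
def Claim_equal_tokenize_highlights_py : Prop := ∀ (text : String), Dom_tokenize_highlights_py text → Spec_tokenize_highlights_py text (tokenize_highlights_py text)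

-- ===== LEMMAS AND PROOFS =====

-- the words of a part, each tagged with flag hl
def wordsHL (cs : List Char) (hl : Bool) : List (String × Bool) :=
  (PySem.Chars.split₀ cs).map (fun w => (String.ofList w, hl))

-- the segment of l before the first "**", and (if any) the remainder after it
def split1 : List Char → List Char × Option (List Char)
  | [] => ([], none)
  | '*' :: '*' :: rest => ([], some rest)
  | c :: rest => ((split1 rest).1.cons c, (split1 rest).2)

-- reference semantics: parts with alternating flags
def tokParts : List (List Char) → Bool → List (String × Bool)
  | [], _ => []
  | p :: ps, hl => wordsHL p hl ++ tokParts ps (!hl)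

theorem split0_go_acc (l cur : List Char) (acc : List (List Char)) :
    PySem.Chars.split₀.go l cur acc = acc.reverse ++ PySem.Chars.split₀.go l cur [] := by
  induction l generalizing cur acc with
  | nil => simp [PySem.Chars.split₀.go]; split <;> simp
  | cons c rest ih =>
    simp only [PySem.Chars.split₀.go]
    split
    · split
      · exact ih [] acc
      · rw [ih [] (cur.reverse :: acc), ih [] [cur.reverse]]; simp
    · exact ih (c :: cur) acc

theorem split0_go_noSpace (l : List Char) (h : ∀ c ∈ l, PySem.Chars.isspace c = false)
    (cur : List Char) (acc : List (List Char)) :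
    PySem.Chars.split₀.go l cur acc =
      if (cur.reverse ++ l).isEmpty then acc.reverse else acc.reverse ++ [cur.reverse ++ l] := by
  induction l generalizing cur with
  | nil =>
    simp only [PySem.Chars.split₀.go]
    split <;> simp_all
  | cons c rest ih =>
    have hc : PySem.Chars.isspace c = false := h c (by simp)
    simp only [PySem.Chars.split₀.go, hc, Bool.false_eq_true, if_false]
    rw [ih (fun x hx => h x (by simp [hx])) (c :: cur)]
    simp [List.append_assoc]

theorem split0_go_break (xs : List Char) (hxs : ∀ c ∈ xs, PySem.Chars.isspace c = false)
    (w : Char) (hw : PySem.Chars.isspace w = true) (ys cur : List Char) (acc : List (List Char)) :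
    PySem.Chars.split₀.go (xs ++ w :: ys) cur acc =
      PySem.Chars.split₀.go ys []
        (if (cur.reverse ++ xs).isEmpty then acc else (cur.reverse ++ xs) :: acc) := by
  induction xs generalizing cur with
  | nil =>
    simp only [List.nil_append, PySem.Chars.split₀.go, hw, if_true]
    split <;> simp_all
  | cons c xs ih =>
    have hc : PySem.Chars.isspace c = false := hxs c (by simp)
    simp only [List.cons_append, PySem.Chars.split₀.go, hc, Bool.false_eq_true, if_false]
    rw [ih (fun x hx => hxs x (by simp [hx])) (c :: cur)]
    simp [List.append_assoc]

theorem wordsHL_noSpace (cs : List Char) (h : ∀ c ∈ cs, PySem.Chars.isspace c = false) (hl : Bool) :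
    wordsHL cs hl = if cs.isEmpty then [] else [(String.ofList cs, hl)] := by
  unfold wordsHL PySem.Chars.split₀
  rw [split0_go_noSpace cs h [] []]
  split <;> simp_all

theorem wordsHL_break (xs : List Char) (hxs : ∀ c ∈ xs, PySem.Chars.isspace c = false)
    (w : Char) (hw : PySem.Chars.isspace w = true) (ys : List Char) (hl : Bool) :
    wordsHL (xs ++ w :: ys) hl = wordsHL xs hl ++ wordsHL ys hl := by
  by_cases hxe : xs = []
  · subst hxe
    unfold wordsHL PySem.Chars.split₀
    rw [split0_go_break [] (by simp) w hw ys [] []]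
    simp [PySem.Chars.split₀.go]
  · unfold wordsHL PySem.Chars.split₀
    rw [split0_go_break xs hxs w hw ys [] [], split0_go_acc,
        split0_go_noSpace xs hxs [] []]
    simp [hxe]

theorem split1_cons (c : Char) (rest : List Char)
    (h : ∀ r', ¬(c = '*' ∧ rest = '*' :: r')) :
    split1 (c :: rest) = ((split1 rest).1.cons c, (split1 rest).2) := by
  match c, rest with
  | '*', '*' :: r' => exact absurd ⟨rfl, rfl⟩ (h r')
  | c, rest =>
    rw [split1]
    · intro r' h1 h2; exact h r' ⟨h1, by rw [h2]⟩

theorem scanTok_eq (l buf : List Char) (hl : Bool)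
    (hbuf : ∀ c ∈ buf, PySem.Chars.isspace c = false) :
    scanTok l buf hl =
      wordsHL (buf ++ (split1 l).1) hl ++
        (match (split1 l).2 with | none => [] | some r => scanTok r [] (!hl)) := by
  induction l, buf, hl using scanTok.induct with
  | case1 buf hl h =>
    simp [scanTok, split1, wordsHL_noSpace buf hbuf, h]
  | case2 buf hl h =>
    simp [scanTok, split1, wordsHL_noSpace buf hbuf, h]
  | case3 rest buf hl ih =>
    simp only [scanTok, split1, wordsHL_noSpace buf hbuf, List.append_nil]
  | case4 c rest buf hl hne hsp ih =>
    rw [split1_cons c rest (fun r' hh => hne r' hh.1 hh.2)]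
    simp only [scanTok, hsp, if_true]
    rw [ih (by intro c hc; cases hc)]
    rw [show (split1 rest).1.cons c = c :: (split1 rest).1 from rfl]
    rw [wordsHL_break buf hbuf c hsp (split1 rest).1 hl]
    rw [wordsHL_noSpace buf hbuf]
    simp [List.append_assoc]
  | case5 c rest buf hl hne hsp ih =>
    rw [split1_cons c rest (fun r' hh => hne r' hh.1 hh.2)]
    simp only [scanTok, hsp, Bool.false_eq_true, if_false]
    have hbuf' : ∀ x ∈ buf ++ [c], PySem.Chars.isspace x = false := by
      intro x hx
      rcases List.mem_append.1 hx with h | h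
      · exact hbuf x h
      · simp at h; subst h; simpa using hsp
    rw [ih hbuf']
    rw [show (split1 rest).1.cons c = c :: (split1 rest).1 from rfl]
    simp [List.append_assoc]

theorem splitOn_go_acc (fuel : Nat) (l cur : List Char) (acc : List (List Char)) :
    PySem.Chars.splitOn.go ['*', '*'] fuel l cur acc =
      acc.reverse ++ PySem.Chars.splitOn.go ['*', '*'] fuel l cur [] := by
  induction fuel generalizing l cur acc with
  | zero => simp [PySem.Chars.splitOn.go]
  | succ fuel ih =>
    cases l with
    | nil => simp [PySem.Chars.splitOn.go]
    | cons c rest =>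
      simp only [PySem.Chars.splitOn.go]
      split
      · rw [ih _ [] (cur.reverse :: acc), ih _ [] [cur.reverse]]; simp
      · exact ih rest (c :: cur) acc

theorem split1_some_len (l r : List Char) (h : (split1 l).2 = some r) :
    r.length + 2 ≤ l.length := by
  induction l using split1.induct with
  | case1 => simp [split1] at h
  | case2 rest =>
    simp [split1] at h; subst h; simp
  | case3 c rest hne ih =>
    rw [split1_cons c rest (fun r' hh => hne r' hh.1 hh.2)] at h
    have := ih h
    simp; omega

theorem splitOn_go_split1 (fuel : Nat) (l : List Char) (hf : l.length ≤ fuel) (cur : List Char) :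
    PySem.Chars.splitOn.go ['*', '*'] fuel l cur [] =
      (cur.reverse ++ (split1 l).1) ::
        (match (split1 l).2 with | none => [] | some r => PySem.Chars.splitOn r ['*', '*']) := by
  induction fuel using Nat.strong_induction_on generalizing l cur with
  | _ fuel ih =>
  match fuel, l with
  | 0, l =>
    have : l = [] := List.length_eq_zero_iff.1 (Nat.le_zero.1 hf)
    subst this
    simp [PySem.Chars.splitOn.go, split1]
  | fuel + 1, [] =>
    simp [PySem.Chars.splitOn.go, split1]
  | fuel + 1, c :: rest =>
    simp only [PySem.Chars.splitOn.go]
    by_cases hp : List.isPrefixOf ['*', '*'] (c :: rest) = true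
    · rw [if_pos hp]
      obtain ⟨r', hc, hr⟩ : ∃ r', c = '*' ∧ rest = '*' :: r' := by
        cases rest with
        | nil => simp [List.isPrefixOf] at hp
        | cons c2 r' =>
          simp [List.isPrefixOf] at hp
          exact ⟨r', hp.1.symm, by rw [← hp.2]⟩
      subst hc; subst hr
      simp only [split1]
      rw [splitOn_go_acc]
      rw [show List.drop (['*', '*'] : List Char).length ('*' :: '*' :: r') = r' from rfl]
      have hlen : r'.length ≤ fuel := by simp at hf; omega
      rw [ih fuel (Nat.lt_succ_self _) r' hlen []]
      have hlen2 : r'.length ≤ r'.length := le_refl _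
      unfold PySem.Chars.splitOn
      rw [ih (r'.length + 1) (by simp at hf ⊢; omega) r' (by omega) []]
      simp only [List.reverse_cons, List.reverse_nil, List.nil_append, List.append_nil]
      cases (split1 r').2 <;> rfl
    · rw [if_neg hp]
      have hne : ∀ r', ¬(c = '*' ∧ rest = '*' :: r') := by
        intro r' ⟨h1, h2⟩; subst h1; subst h2; simp [List.isPrefixOf] at hp
      rw [split1_cons c rest hne]
      rw [ih fuel (Nat.lt_succ_self _) rest (by simp at hf; omega) (c :: cur)]
      simp

theorem splitOn_split1 (l : List Char) :
    PySem.Chars.splitOn l ['*', '*'] =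
      (split1 l).1 ::
        (match (split1 l).2 with | none => [] | some r => PySem.Chars.splitOn r ['*', '*']) := by
  unfold PySem.Chars.splitOn
  rw [splitOn_go_split1 (l.length + 1) l (by omega) []]
  simp only [List.reverse_nil, List.nil_append]
  cases (split1 l).2 <;> rfl

theorem alt_eq_tokParts (l : List Char) (hl : Bool) :
    scanTok l [] hl = tokParts (PySem.Chars.splitOn l ['*', '*']) hl := by
  induction hn : l.length using Nat.strong_induction_on generalizing l hl with
  | _ n ih =>
  subst hn
  rw [scanTok_eq l [] hl (by intro c hc; cases hc), splitOn_split1 l]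
  cases ho : (split1 l).2 with
  | none => simp [tokParts]
  | some r =>
    simp only [tokParts, List.nil_append]
    have := split1_some_len l r ho
    rw [ih r.length (by omega) r (!hl) rfl]

theorem mod_flip (s : Int) :
    decide (PySem.Int.mod (s + 1) 2 = 1) = !decide (PySem.Int.mod s 2 = 1) := by
  rw [PySem.Int.mod_eq_emod_of_pos (by norm_num : (0:Int) < 2) (a := s + 1),
      PySem.Int.mod_eq_emod_of_pos (by norm_num : (0:Int) < 2) (a := s)]
  by_cases h : s % 2 = 1
  · simp [h]; omega
  · simp [h]; omega

theorem A_loop (ps : List (List Char)) (s : Int) (hs : 0 ≤ s) (acc : List (String × Bool)) :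
    (PySem.List.enumerate ps s).foldl
      (fun toks ip =>
        if ip.2.isEmpty then toks
        else
          toks ++ (PySem.Chars.split₀ ip.2).map
            (fun w => (String.ofList w, decide (PySem.Int.mod ip.1 2 = 1))))
      acc = acc ++ tokParts ps (decide (PySem.Int.mod s 2 = 1)) := by
  induction ps generalizing s acc with
  | nil => simp [PySem.List.enumerate_nil, tokParts]
  | cons p ps ih =>
    rw [PySem.List.enumerate_cons, List.foldl_cons, ih (s + 1) (by omega),
        tokParts, mod_flip s]
    by_cases hp : p.isEmpty
    · have : p = [] := by simpa [List.isEmpty_iff] using hp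
      subst this
      simp [wordsHL, PySem.Chars.split₀, PySem.Chars.split₀.go]
    · simp [hp, wordsHL]

theorem tokParts_empty_text : tokParts (PySem.Chars.splitOn [] ['*', '*']) false = [] := by
  simp [PySem.Chars.splitOn, PySem.Chars.splitOn.go, tokParts, wordsHL,
        PySem.Chars.split₀, PySem.Chars.split₀.go]

-- ===== VERDICT (by name: the statement is the Claim_ definition above) =====
theorem tokenize_highlights_py_spec : Claim_equal_tokenize_highlights_py := by
  intro text _
  show tokenize_highlights_py text = tokenize_highlights_py_alt text
  unfold tokenize_highlights_py tokenize_highlights_py_alt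
  rw [alt_eq_tokParts]
  by_cases h : text = ""
  · subst h
    simpa using tokParts_empty_text.symm
  · rw [if_neg h]
    rw [A_loop _ 0 (by omega) []]
    simp [PySem.Int.mod]
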